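-- pv_equiv track=rewrite | github.com/zhaoyue-ntu/qp_evaluation | evaluation/algorithms/e2e_cost/e2e_dataset.py | merge_plans_level
-- ===== SOURCE A (Python) =====
-- import copy
-- import copy
--
-- def merge_plans_level(level1, level2, isMapping=False):
--     l = copy.deepcopy(level1)
--     l2 = copy.deepcopy(level2)
--     for idx in range(len(l2)):
--         if idx >= len(l):
--             l.append([])
--         if isMapping:
--             if len(l) > idx+1:
--                 base = len(l[idx+1])
--             else:
--                 base = 0
--             for i in range(len(l2[idx])):
--                 if l2[idx][i][0] > 0:
--                     l2[idx][i][0] += base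
--                 if l2[idx][i][1] > 0:
--                     l2[idx][i][1] += base
--         l[idx] += l2[idx]
--     return l
-- ===== SOURCE B (Python) =====
-- def merge_plans_level(level1, level2, isMapping=False):
--     # stage 1: per-level offsets read once from the ORIGINAL level1
--     offsets = [len(nxt) for nxt in level1[1:]]
--
--     def bump(row, base):
--         return [v + base if j < 2 and v > 0 else v for j, v in enumerate(row)]
--
--     # stage 2: a fully bumped copy of level2, built before any merging
--     if isMapping:
--         l2 = [[bump(r, offsets[i] if i < len(offsets) else 0) for r in lvl]
--               for i, lvl in enumerate(level2)]
--     else: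
--         l2 = [[list(r) for r in lvl] for lvl in level2]
--
--     # stage 3: recursive zip-concatenate, keeping the longer tail
--     def zipcat(xs, ys):
--         if not ys:
--             return [[list(r) for r in lvl] for lvl in xs]
--         head = ([list(r) for r in xs[0]] if xs else []) + ys[0]
--         return [head] + zipcat(xs[1:], ys[1:])
--
--     return zipcat(level1, l2)
-- ===== Notes on version B (the rewrite author's own statement) =====
-- stated objective: alternative
-- what changed: Replaces A's single interleaved index loop that mutates deep copies in place (padding l, bumping l2's rows against the evolving l, extending l[idx]) by three staged passes: precompute an offset list from the original level1, build a fully bumped copy of level2 up front, then merge by a structural recursion (zip-concatenate keeping the longer tail) with no index arithmetic or mutation.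
import Mathlib
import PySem

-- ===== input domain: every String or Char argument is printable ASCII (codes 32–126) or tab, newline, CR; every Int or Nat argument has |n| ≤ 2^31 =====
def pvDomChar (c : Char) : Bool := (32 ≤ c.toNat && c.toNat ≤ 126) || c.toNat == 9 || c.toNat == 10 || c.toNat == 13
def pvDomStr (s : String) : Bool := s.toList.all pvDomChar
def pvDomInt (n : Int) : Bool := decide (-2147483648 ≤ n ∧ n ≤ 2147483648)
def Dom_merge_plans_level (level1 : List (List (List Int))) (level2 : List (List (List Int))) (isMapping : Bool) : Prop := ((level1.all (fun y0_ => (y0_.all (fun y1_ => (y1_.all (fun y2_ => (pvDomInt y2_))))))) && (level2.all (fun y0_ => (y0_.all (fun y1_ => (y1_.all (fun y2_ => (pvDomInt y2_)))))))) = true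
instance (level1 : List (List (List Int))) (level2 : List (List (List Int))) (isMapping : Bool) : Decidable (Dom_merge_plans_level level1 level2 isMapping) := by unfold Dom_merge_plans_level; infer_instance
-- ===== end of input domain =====

-- B replaces A's single interleaved index loop mutating deep copies by three staged passes
-- (precomputed offset list, a fully bumped copy of level2, a recursive zip-concatenate);
-- same cost (objective: alternative).  Neither version mutates its actual arguments.

-- ===== PORT A =====
-- inner mutation of one pair l2[idx][i]: reads/writes components 0 and 1 in A's order
def bumpCellA (base : Int) (cell : List Int) : List Int :=
  let cell := if ((cell[0]?).getD 0) > 0 then cell.set 0 (((cell[0]?).getD 0) + base) else cell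
  if ((cell[1]?).getD 0) > 0 then cell.set 1 (((cell[1]?).getD 0) + base) else cell

-- A's inner 'for i in range(len(l2[idx]))' loop mutating row cells in place
def bumpRowA (base : Int) (row : List (List Int)) : List (List Int) :=
  (List.range row.length).foldl (fun r i => r.set i (bumpCellA base ((r[i]?).getD []))) row

-- one iteration of A's 'for idx in range(len(l2))' loop over the state (l, l2)
def stepA (isMapping : Bool) (st : List (List (List Int)) × List (List (List Int))) (idx : Nat) :
    List (List (List Int)) × List (List (List Int)) :=
  let l := st.1
  let l2 := st.2
  let l := if l.length ≤ idx then l ++ [[]] else l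
  let l2 :=
    if isMapping then
      let base : Int := if idx + 1 < l.length then (((l[idx+1]?).getD []).length : Int) else 0
      l2.set idx (bumpRowA base ((l2[idx]?).getD []))
    else l2
  let l := l.set idx (((l[idx]?).getD []) ++ ((l2[idx]?).getD []))
  (l, l2)

def merge_plans_level (level1 : List (List (List Int))) (level2 : List (List (List Int))) (isMapping : Bool) : List (List (List Int)) :=
  ((List.range level2.length).foldl (stepA isMapping) (level1, level2)).1

-- ===== PORT B =====
-- Source B's bump(row, base): Python's enumerate yields (j, v); Lean's zipIdx yields (v, j)
def bumpB (base : Int) (row : List Int) : List Int :=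
  row.zipIdx.map (fun vj => if vj.2 < 2 ∧ vj.1 > 0 then vj.1 + base else vj.1)

-- Source B's zipcat: recursive zip-concatenate keeping the longer tail
def zipcatB (xs ys : List (List (List Int))) : List (List (List Int)) :=
  match ys with
  | [] => xs
  | y :: ys' =>
    match xs with
    | [] => ([] ++ y) :: zipcatB [] ys'
    | x :: xs' => (x ++ y) :: zipcatB xs' ys'

def merge_plans_level_alt (level1 : List (List (List Int))) (level2 : List (List (List Int))) (isMapping : Bool) : List (List (List Int)) :=
  -- stage 1: offsets = [len(nxt) for nxt in level1[1:]]
  let offsets : List Int := (level1.drop 1).map (fun nxt => (nxt.length : Int))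
  -- stage 2: bumped copy of level2 ('offsets[i] if i < len(offsets) else 0' is getD 0)
  let l2 :=
    if isMapping then
      level2.zipIdx.map (fun li => li.1.map (bumpB ((offsets[li.2]?).getD 0)))
    else level2
  -- stage 3
  zipcatB level1 l2

-- ===== PRECONDITION & SPEC =====
-- Pre_ excludes exactly the inputs on which A raises IndexError: isMapping with an inner
-- list of level2 shorter than 2 (A indexes [0] and [1] unconditionally).
def Pre_merge_plans_level (level1 : List (List (List Int))) (level2 : List (List (List Int))) (isMapping : Bool) : Prop :=
  isMapping = true → ∀ row ∈ level2, ∀ c ∈ row, 2 ≤ c.length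
instance (level1 : List (List (List Int))) (level2 : List (List (List Int))) (isMapping : Bool) : Decidable (Pre_merge_plans_level level1 level2 isMapping) := by unfold Pre_merge_plans_level; infer_instance

def pvWitness_merge_plans_level : List (List (List Int)) × List (List (List Int)) × Bool :=
  ([[[1, 2]], [[3, 4], [0, 5]]], [[[1, 1]], [[2, -1]]], true)

def Spec_merge_plans_level (level1 : List (List (List Int))) (level2 : List (List (List Int))) (isMapping : Bool) (out : List (List (List Int))) : Prop := out = merge_plans_level_alt level1 level2 isMapping
instance (level1 : List (List (List Int))) (level2 : List (List (List Int))) (isMapping : Bool) (out : List (List (List Int))) : Decidable (Spec_merge_plans_level level1 level2 isMapping out) := by unfold Spec_merge_plans_level; infer_instance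

-- ===== CLAIM (what is proved, stated in full; the proofs are below) =====
def Claim_equal_merge_plans_level : Prop := ∀ (level1 : List (List (List Int))) (level2 : List (List (List Int))) (isMapping : Bool), Dom_merge_plans_level level1 level2 isMapping → Pre_merge_plans_level level1 level2 isMapping → Spec_merge_plans_level level1 level2 isMapping (merge_plans_level level1 level2 isMapping)

-- ===== LEMMAS AND PROOFS =====

-- the base A computes at index idx, expressed on the original level1
def baseO (level1 : List (List (List Int))) (idx : Nat) : Int :=
  if idx + 1 < level1.length then (((level1[idx+1]?).getD []).length : Int) else 0

-- the row of l2 after A's (possible) bumping at index idx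
def bv (level1 level2 : List (List (List Int))) (isMapping : Bool) (idx : Nat) : List (List Int) :=
  if isMapping then bumpRowA (baseO level1 idx) ((level2[idx]?).getD []) else (level2[idx]?).getD []

-- the merged level A stores at index idx
def fA (level1 level2 : List (List (List Int))) (isMapping : Bool) (idx : Nat) : List (List Int) :=
  ((level1[idx]?).getD []) ++ bv level1 level2 isMapping idx

-- generic: the set-based in-place map over indices equals List.map
lemma foldl_set_map (t : List Int → List Int) (p s : List (List Int)) :
    (List.range' p.length s.length).foldl (fun r i => r.set i (t ((r[i]?).getD []))) (p ++ s)
      = p ++ s.map t := by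
  induction s generalizing p with
  | nil => simp
  | cons c s ih =>
    simp only [List.length_cons, List.range'_succ, List.foldl_cons]
    have h1 : ((p ++ c :: s)[p.length]?).getD [] = c := by
      simp [List.getElem?_append_right]
    have h2 : (p ++ c :: s).set p.length (t c) = (p ++ [t c]) ++ s := by
      rw [List.set_append_right _ _ (le_refl _)]
      simp
    rw [h1, h2]
    have := ih (p ++ [t c])
    simpa using this

lemma bumpRowA_eq_map (base : Int) (row : List (List Int)) :
    bumpRowA base row = row.map (bumpCellA base) := by
  have := foldl_set_map (bumpCellA base) [] row
  simpa [bumpRowA, List.range_eq_range'] using this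

lemma map_bump_zipIdx_ge2 (base : Int) (rest : List Int) (k : Nat) (hk : 2 ≤ k) :
    (rest.zipIdx k).map (fun vj => if vj.2 < 2 ∧ vj.1 > 0 then vj.1 + base else vj.1) = rest := by
  induction rest generalizing k with
  | nil => simp
  | cons x rest ih =>
    simp only [List.zipIdx_cons, List.map_cons]
    rw [if_neg (fun hc => absurd hc.1 (by omega)), ih (k+1) (by omega)]

lemma bumpCellA_eq_bumpB (base : Int) (cell : List Int) (h : 2 ≤ cell.length) :
    bumpCellA base cell = bumpB base cell := by
  match cell, h with
  | x :: y :: rest, _ =>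
    unfold bumpCellA bumpB
    simp only [List.zipIdx_cons, List.map_cons]
    rw [map_bump_zipIdx_ge2 base rest 2 (le_refl _)]
    by_cases hx : x > 0 <;> by_cases hy : y > 0 <;>
      simp [hx, hy, List.set]

-- zipcatB characterised pointwise over List.range
lemma zipcat_eq (xs ys : List (List (List Int))) :
    zipcatB xs ys
      = (List.range (max xs.length ys.length)).map
          (fun i => ((xs[i]?).getD []) ++ ((ys[i]?).getD [])) := by
  induction ys generalizing xs with
  | nil =>
    simp only [zipcatB, List.length_nil, Nat.max_zero]
    apply List.ext_getElem
    · simp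
    · intro i h1 h2
      simp [List.getElem?_eq_getElem h1]
  | cons y ys ih =>
    cases xs with
    | nil =>
      simp only [zipcatB, ih]
      apply List.ext_getElem
      · simp
      · intro i h1 h2
        match i with
        | 0 => simp
        | n+1 => simp
    | cons x xs =>
      simp only [zipcatB, ih]
      apply List.ext_getElem
      · simp
      · intro i h1 h2
        cases i with
        | zero => simp
        | succ n => simp

-- B's stage-1/2 result at index i equals the original level2 row bumped by baseO
lemma alt_eq_G (level1 level2 : List (List (List Int))) (isMapping : Bool) :
    merge_plans_level_alt level1 level2 isMapping
      = (List.range (max level1.length level2.length)).map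
          (fun i => ((level1[i]?).getD []) ++
            (if isMapping then ((level2[i]?).getD []).map (bumpB (baseO level1 i))
             else (level2[i]?).getD [])) := by
  unfold merge_plans_level_alt
  cases isMapping with
  | false => simp [zipcat_eq]
  | true =>
    simp only [reduceIte]
    rw [zipcat_eq]
    have hlen : (level2.zipIdx.map (fun li => li.1.map
        (bumpB ((((level1.drop 1).map (fun nxt => (nxt.length : Int)))[li.2]?).getD 0)))).length
        = level2.length := by simp
    rw [hlen]
    apply List.map_congr_left
    intro i hi
    congr 1
    by_cases h2 : i < level2.length
    · rw [List.getElem?_map, List.getElem?_zipIdx]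
      simp only [List.getElem?_eq_getElem h2, Option.map_some, Option.getD_some]
      congr 1
      have hoff : ((((level1.drop 1).map (fun nxt => (nxt.length : Int)))[i]?).getD 0)
          = baseO level1 i := by
        rw [List.getElem?_map, List.getElem?_drop]
        unfold baseO
        by_cases hb : i + 1 < level1.length
        · rw [if_pos hb]
          have h1i : 1 + i = i + 1 := by omega
          rw [h1i]
          simp [List.getElem?_eq_getElem hb]
        · rw [if_neg hb]
          have : (level1[1 + i]?) = none := by simp; omega
          simp [this]
      simp only [Nat.zero_add]
      rw [hoff]
    · have ha : (level2[i]?) = none := by simp; omega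
      have hb : ((level2.zipIdx.map (fun li => li.1.map
          (bumpB ((((level1.drop 1).map (fun nxt => (nxt.length : Int)))[li.2]?).getD 0))))[i]?)
          = none := by simp; omega
      simp [ha, hb]

-- the key invariant of A's outer loop
lemma outer_inv (level1 level2 : List (List (List Int))) (isMapping : Bool)
    (k : Nat) (hk : k ≤ level2.length) :
    (List.range k).foldl (stepA isMapping) (level1, level2)
      = ((List.range k).map (fA level1 level2 isMapping) ++ level1.drop k,
         (List.range k).map (bv level1 level2 isMapping) ++ level2.drop k) := by
  induction k with
  | zero => simp
  | succ k ih =>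
    have hk' : k ≤ level2.length := Nat.le_of_succ_le hk
    have hklt : k < level2.length := hk
    rw [List.range_succ, List.foldl_append, ih hk']
    simp only [List.foldl_cons, List.foldl_nil, stepA]
    set P := (List.range k).map (fA level1 level2 isMapping) with hP
    set Q := (List.range k).map (bv level1 level2 isMapping) with hQ
    have hPlen : P.length = k := by simp [hP]
    have hQlen : Q.length = k := by simp [hQ]
    have hl2get : ((Q ++ level2.drop k)[k]?).getD [] = (level2[k]?).getD [] := by
      rw [List.getElem?_append_right (by omega)]
      simp [hQlen, List.getElem?_drop]
    have hdropk : level2.drop k = level2[k] :: level2.drop (k+1) :=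
      (List.drop_eq_getElem_cons hklt)
    by_cases hn1 : level1.length ≤ k
    · have hd1 : level1.drop k = [] := List.drop_eq_nil_of_le hn1
      have hd1' : level1.drop (k+1) = [] := List.drop_eq_nil_of_le (by omega)
      have hg1 : (level1[k]?) = none := by simp; omega
      rw [hd1]
      simp only [List.append_nil]
      have hlen : P.length ≤ k := by omega
      rw [if_pos hlen]
      have hbase : (if k + 1 < (P ++ [([] : List (List Int))]).length
          then ((((P ++ [([] : List (List Int))])[k+1]?).getD []).length : Int) else 0) = baseO level1 k := by
        have : (P ++ [([] : List (List Int))]).length = k + 1 := by simp [hPlen]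
        rw [if_neg (by omega)]
        unfold baseO; rw [if_neg (by omega)]
      have hQ' : (if isMapping then
            (Q ++ level2.drop k).set k (bumpRowA
              (if k + 1 < (P ++ [([] : List (List Int))]).length
               then ((((P ++ [([] : List (List Int))])[k+1]?).getD []).length : Int) else 0)
              (((Q ++ level2.drop k)[k]?).getD []))
          else Q ++ level2.drop k)
          = (Q ++ [bv level1 level2 isMapping k]) ++ level2.drop (k+1) := by
        cases isMapping with
        | false =>
          rw [if_neg (by decide), hdropk]
          simp [bv, List.getElem?_eq_getElem hklt]
        | true =>
          simp only [if_pos rfl]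
          rw [hbase, hl2get, hdropk]
          rw [List.set_append_right _ _ (by omega), hQlen]
          simp [bv, List.getElem?_eq_getElem hklt]
          rw [hdropk]
          rfl
      rw [hQ']
      have hget1 : (((P ++ [([] : List (List Int))])[k]?).getD []) = ([] : List (List Int)) := by
        rw [List.getElem?_append_right (by omega)]
        simp [hPlen]
      have hget2 : ((((Q ++ [bv level1 level2 isMapping k]) ++ level2.drop (k+1))[k]?).getD [])
          = bv level1 level2 isMapping k := by
        rw [List.getElem?_append_left (by simp [hQlen])]
        rw [List.getElem?_append_right (by omega)]
        simp [hQlen]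
      rw [hget1, hget2]
      have hset : (P ++ [([] : List (List Int))]).set k ([] ++ bv level1 level2 isMapping k)
          = P ++ [fA level1 level2 isMapping k] := by
        rw [List.set_append_right _ _ (by omega), hPlen]
        simp [fA, hg1]
      rw [hset]
      simp [List.map_append, hd1', ← hP, ← hQ]
    · push_neg at hn1
      have hd1 : level1.drop k = level1[k] :: level1.drop (k+1) := List.drop_eq_getElem_cons hn1
      have hlen : ¬ ((P ++ level1.drop k).length ≤ k) := by
        simp [hPlen]; omega
      rw [if_neg hlen]
      have hLlen : (P ++ level1.drop k).length = level1.length := by simp [hPlen]; omega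
      have hbase : (if k + 1 < (P ++ level1.drop k).length
          then ((((P ++ level1.drop k)[k+1]?).getD []).length : Int) else 0) = baseO level1 k := by
        unfold baseO
        rw [hLlen]
        by_cases hb : k + 1 < level1.length
        · rw [if_pos hb, if_pos hb]
          have : ((P ++ level1.drop k)[k+1]?) = (level1[k+1]?) := by
            rw [List.getElem?_append_right (by omega), hPlen, List.getElem?_drop]
            congr 1; omega
          rw [this]
        · rw [if_neg hb, if_neg hb]
      have hQ' : (if isMapping then
            (Q ++ level2.drop k).set k (bumpRowA
              (if k + 1 < (P ++ level1.drop k).length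
               then ((((P ++ level1.drop k)[k+1]?).getD []).length : Int) else 0)
              (((Q ++ level2.drop k)[k]?).getD []))
          else Q ++ level2.drop k)
          = (Q ++ [bv level1 level2 isMapping k]) ++ level2.drop (k+1) := by
        cases isMapping with
        | false =>
          rw [if_neg (by decide), hdropk]
          simp [bv, List.getElem?_eq_getElem hklt]
        | true =>
          simp only [if_pos rfl]
          rw [hbase, hl2get, hdropk]
          rw [List.set_append_right _ _ (by omega), hQlen]
          simp [bv, List.getElem?_eq_getElem hklt]
          rw [hdropk]
          rfl
      rw [hQ']
      have hget1 : (((P ++ level1.drop k)[k]?).getD []) = level1[k] := by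
        rw [List.getElem?_append_right (by omega), hPlen, hd1]
        simp [List.getElem?_eq_getElem hn1]
      have hget2 : ((((Q ++ [bv level1 level2 isMapping k]) ++ level2.drop (k+1))[k]?).getD [])
          = bv level1 level2 isMapping k := by
        rw [List.getElem?_append_left (by simp [hQlen])]
        rw [List.getElem?_append_right (by omega)]
        simp [hQlen]
      rw [hget1, hget2]
      have hset : (P ++ level1.drop k).set k (level1[k] ++ bv level1 level2 isMapping k)
          = (P ++ [fA level1 level2 isMapping k]) ++ level1.drop (k+1) := by
        rw [List.set_append_right _ _ (by omega), hPlen, Nat.sub_self, hd1,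
          List.set_cons_zero]
        simp [fA, List.getElem?_eq_getElem hn1]
      rw [hset]
      simp [List.map_append, List.append_assoc, ← hP, ← hQ]

-- pointwise agreement of the per-level functions inside level2's range
lemma fA_eq_g (level1 level2 : List (List (List Int))) (isMapping : Bool)
    (hpre : Pre_merge_plans_level level1 level2 isMapping) (idx : Nat) (h2 : idx < level2.length) :
    fA level1 level2 isMapping idx
      = ((level1[idx]?).getD []) ++
        (if isMapping then ((level2[idx]?).getD []).map (bumpB (baseO level1 idx))
         else (level2[idx]?).getD []) := by
  unfold fA bv
  congr 1
  cases isMapping with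
  | false => simp
  | true =>
    rw [if_pos rfl, if_pos rfl, bumpRowA_eq_map]
    apply List.map_congr_left
    intro c hc
    apply bumpCellA_eq_bumpB
    have hrow : (level2[idx]?).getD [] = level2[idx] := by
      simp [List.getElem?_eq_getElem h2]
    rw [hrow] at hc
    exact hpre rfl _ (List.getElem_mem h2) _ hc

-- ===== VERDICT (by name: the statement is the Claim_ definition above) =====
theorem merge_plans_level_spec : Claim_equal_merge_plans_level := by
  unfold Claim_equal_merge_plans_level
  intro level1 level2 isMapping _ hpre
  unfold Spec_merge_plans_level merge_plans_level
  rw [outer_inv level1 level2 isMapping level2.length (le_refl _), alt_eq_G]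
  simp only []
  apply List.ext_getElem
  · simp; omega
  · intro i hA hB
    rw [List.getElem_map, List.getElem_range]
    by_cases h2 : i < level2.length
    · rw [List.getElem_append_left (by simpa using h2)]
      rw [List.getElem_map, List.getElem_range]
      exact fA_eq_g level1 level2 isMapping hpre i h2
    · push_neg at h2
      have h1 : i < level1.length := by
        have := hB; simp at this; omega
      have hg2 : (level2[i]?) = none := by simp; omega
      rw [List.getElem_append_right (by simpa using h2)]
      have hidx : level2.length + (i - level2.length) = i := by omega
      cases isMapping <;>
        simp [hg2, List.getElem?_eq_getElem h1, List.getElem_drop, hidx]
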